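-- pv_equiv track=rewrite | github.com/ejmockler/indra-belief-model | scripts/simulate_t63_lift.py | _claim_entities_in_roles
-- ===== SOURCE A (Python) =====
-- def _name_in(name: str, names: tuple[str, ...]) -> bool:
--     """Approximate `_names_intersect`: case-insensitive token-subset match.
--
--     Mirrors adjudicate's matching with no alias map (since we don't carry
--     aliases in the preview). For the FN/win discrimination, this is good
--     enough at the population level.
--     """
--     if not name or not names:
--         return False
--     lname = name.lower()
--     for n in names:
--         ln = n.lower()
--         if ln == lname or lname in ln or ln in lname:
--             return True
--     return False
--
-- def _claim_entities_in_roles(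
--     subject: str, obj: str, axis_is_binding: bool,
--     assertions: list[tuple[tuple[str, ...], tuple[str, ...]]],
-- ) -> bool:
--     """Predict the entities-seen check from T63."""
--     if axis_is_binding:
--         # Symmetric — check combined agents+targets for both
--         for name in (subject, obj):
--             if not any(_name_in(name, ag + tg) for ag, tg in assertions):
--                 return False
--         return True
--     # Directional — subject in any agents, obj in any targets
--     if not any(_name_in(subject, ag) for ag, _ in assertions):
--         return False
--     if not any(_name_in(obj, tg) for _, tg in assertions):
--         return False
--     return True
-- ===== SOURCE B (Python) =====
-- def _name_in(name: str, names: tuple[str, ...]) -> bool: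
--     if not name or not names:
--         return False
--     lname = name.lower()
--     for n in names:
--         ln = n.lower()
--         if ln == lname or lname in ln or ln in lname:
--             return True
--     return False
--
-- def _claim_entities_in_roles(
--     subject: str, obj: str, axis_is_binding: bool,
--     assertions: list[tuple[tuple[str, ...], tuple[str, ...]]],
-- ) -> bool:
--     # Single pass: maintain two flags, break early once both are found.
--     subj_found = False
--     obj_found = False
--     for ag, tg in assertions:
--         if axis_is_binding:
--             pool = ag + tg
--             subj_found = subj_found or _name_in(subject, pool)
--             obj_found = obj_found or _name_in(obj, pool)
--         else:
--             subj_found = subj_found or _name_in(subject, ag)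
--             obj_found = obj_found or _name_in(obj, tg)
--         if subj_found and obj_found:
--             return True
--     return subj_found and obj_found
-- ===== Notes on version B (the rewrite author's own statement) =====
-- stated objective: alternative
-- what changed: Replaces A's two-to-three separate any(...) scans over assertions with one single pass maintaining subj_found/obj_found flags and an early exit once both are set.
import Mathlib
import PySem

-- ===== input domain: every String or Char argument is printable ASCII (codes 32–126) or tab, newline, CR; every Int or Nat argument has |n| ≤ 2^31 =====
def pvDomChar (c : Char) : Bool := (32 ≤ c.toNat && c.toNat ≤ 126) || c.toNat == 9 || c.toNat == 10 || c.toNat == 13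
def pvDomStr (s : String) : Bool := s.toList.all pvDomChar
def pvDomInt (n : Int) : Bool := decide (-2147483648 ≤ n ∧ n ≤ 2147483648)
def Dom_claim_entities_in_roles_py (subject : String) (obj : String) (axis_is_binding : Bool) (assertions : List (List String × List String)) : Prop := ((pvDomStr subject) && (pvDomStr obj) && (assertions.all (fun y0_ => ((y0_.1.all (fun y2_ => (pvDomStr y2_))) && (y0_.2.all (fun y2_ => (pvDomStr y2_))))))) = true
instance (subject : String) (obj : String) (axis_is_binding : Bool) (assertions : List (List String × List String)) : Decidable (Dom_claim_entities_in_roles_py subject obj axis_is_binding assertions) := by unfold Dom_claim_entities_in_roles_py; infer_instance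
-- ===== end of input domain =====

-- B fuses A's separate any(...) scans over `assertions` into one single pass with two found-flags and an early exit; helper `_name_in` unchanged. Objective: alternative decomposition (same asymptotic cost).


-- ===== PORT A =====
-- shared helper: port of _name_in (identical in Source A and Source B)
def name_in (name : String) (names : List String) : Bool :=
  if name == "" || names.isEmpty then false
  else
    let lname := PySem.Str.lower name
    names.any (fun n =>
      let ln := PySem.Str.lower n
      ln == lname || PySem.Str.isIn lname ln || PySem.Str.isIn ln lname)

def claim_entities_in_roles_py (subject : String) (obj : String) (axis_is_binding : Bool) (assertions : List (List String × List String)) : Bool :=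
  if axis_is_binding then
    -- for name in (subject, obj): if not any(...): return False ; return True
    [subject, obj].all (fun name =>
      assertions.any (fun p => name_in name (p.1 ++ p.2)))
  else
    if !(assertions.any (fun p => name_in subject p.1)) then false
    else if !(assertions.any (fun p => name_in obj p.2)) then false
    else true

-- ===== PORT B =====
-- single pass with two flags and early exit (Source B's loop)
def altLoop (subject : String) (obj : String) (axis_is_binding : Bool) :
    Bool → Bool → List (List String × List String) → Bool
  | sf, of_, [] => sf && of_
  | sf, of_, (ag, tg) :: rest =>
    let sf' := if axis_is_binding then sf || name_in subject (ag ++ tg)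
               else sf || name_in subject ag
    let of' := if axis_is_binding then of_ || name_in obj (ag ++ tg)
               else of_ || name_in obj tg
    if sf' && of' then true
    else altLoop subject obj axis_is_binding sf' of' rest

def claim_entities_in_roles_py_alt (subject : String) (obj : String) (axis_is_binding : Bool) (assertions : List (List String × List String)) : Bool :=
  altLoop subject obj axis_is_binding false false assertions

-- ===== PRECONDITION & SPEC =====
def Spec_claim_entities_in_roles_py (subject : String) (obj : String) (axis_is_binding : Bool) (assertions : List (List String × List String)) (out : Bool) : Prop := out = claim_entities_in_roles_py_alt subject obj axis_is_binding assertions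
instance (subject : String) (obj : String) (axis_is_binding : Bool) (assertions : List (List String × List String)) (out : Bool) : Decidable (Spec_claim_entities_in_roles_py subject obj axis_is_binding assertions out) := by unfold Spec_claim_entities_in_roles_py; infer_instance

-- ===== CLAIM (what is proved, stated in full; the proofs are below) =====
def Claim_equal_claim_entities_in_roles_py : Prop := ∀ (subject : String) (obj : String) (axis_is_binding : Bool) (assertions : List (List String × List String)), Dom_claim_entities_in_roles_py subject obj axis_is_binding assertions → Spec_claim_entities_in_roles_py subject obj axis_is_binding assertions (claim_entities_in_roles_py subject obj axis_is_binding assertions)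

-- ===== LEMMAS AND PROOFS =====
-- the flag loop computes (sf || any subj-test) && (of || any obj-test)
theorem altLoop_eq (subject obj : String) (b : Bool) (sf of_ : Bool)
    (l : List (List String × List String)) :
    altLoop subject obj b sf of_ l =
      ((sf || l.any (fun p => if b then name_in subject (p.1 ++ p.2) else name_in subject p.1)) &&
       (of_ || l.any (fun p => if b then name_in obj (p.1 ++ p.2) else name_in obj p.2))) := by
  induction l generalizing sf of_ with
  | nil => simp [altLoop]
  | cons p rest ih =>
    obtain ⟨ag, tg⟩ := p
    cases b <;>
      simp only [altLoop, List.any_cons, if_true, if_false, Bool.false_eq_true] <;>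
      split_ifs with h <;>
      (try rw [ih]) <;>
      cases sf <;> cases of_ <;> simp_all [Bool.or_assoc]

-- ===== VERDICT (by name: the statement is the Claim_ definition above) =====
theorem claim_entities_in_roles_py_spec : Claim_equal_claim_entities_in_roles_py := by
  intro subject obj b assertions _
  unfold Spec_claim_entities_in_roles_py claim_entities_in_roles_py claim_entities_in_roles_py_alt
  rw [altLoop_eq]
  cases b <;> simp [List.all_cons] <;>
    cases assertions.any (fun p => name_in subject p.1) <;>
      simp
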